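-- pv_equiv track=rewrite | github.com/GHC-gcornet/market-intelligence-app | app.py | weighted_mode
-- ===== SOURCE A (Python) =====
-- def weighted_mode(values: list[tuple[str, int]]) -> str:
--     counter: dict[str, int] = {}
--     for value, weight in values:
--         counter[value] = counter.get(value, 0) + max(weight, 1)
--
--     best_value = ""
--     best_weight = -1
--     for value, weight in counter.items():
--         if weight > best_weight:
--             best_value = value
--             best_weight = weight
--
--     return best_value
-- ===== SOURCE B (Python) =====
-- def weighted_mode(values: list[tuple[str, int]]) -> str:
--     order = list(dict.fromkeys(v for v, _ in values))
--     return max(order,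
--                key=lambda v: sum(max(w, 1) for u, w in values if u == v),
--                default="")
-- ===== Notes on version B (the rewrite author's own statement) =====
-- stated objective: alternative
-- what changed: B drops A's weight-accumulating dict and running best_value/best_weight scan entirely: it dedups the keys in first-occurrence order, recounts each candidate's total weight by a scan over the input, and picks the winner with max(key=..., default="") whose stability reproduces A's first-inserted tie-break.
import Mathlib
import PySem

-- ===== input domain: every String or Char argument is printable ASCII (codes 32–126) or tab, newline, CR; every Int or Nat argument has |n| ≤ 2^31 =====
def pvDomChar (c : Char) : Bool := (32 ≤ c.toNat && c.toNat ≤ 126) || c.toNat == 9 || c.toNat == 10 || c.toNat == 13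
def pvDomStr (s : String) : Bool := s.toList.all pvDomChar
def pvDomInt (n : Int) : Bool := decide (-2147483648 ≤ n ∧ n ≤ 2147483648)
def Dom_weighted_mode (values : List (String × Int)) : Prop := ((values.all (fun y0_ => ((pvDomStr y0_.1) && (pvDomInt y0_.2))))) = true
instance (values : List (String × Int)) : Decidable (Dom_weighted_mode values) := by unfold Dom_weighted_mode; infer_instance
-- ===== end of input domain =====

-- B drops A's accumulation dict and tracking scan: it dedups the keys in first-occurrence
-- order, recounts each candidate's total weight, and picks the winner with max(key=…, default="").

-- ===== PORT A =====
-- counter[value] = counter.get(value, 0) + max(weight, 1)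
def pvBuild (values : List (String × Int)) : PySem.Dict String Int :=
  values.foldl (fun c p => c.insert p.1 (c.getD p.1 0 + max p.2 1)) PySem.Dict.empty

-- A's second loop body: if weight > best_weight: best_value, best_weight = value, weight
def pvStep (b : String × Int) (p : String × Int) : String × Int :=
  if p.2 > b.2 then (p.1, p.2) else b

def weighted_mode (values : List (String × Int)) : String :=
  ((pvBuild values).items.foldl pvStep ("", -1)).1

-- ===== PORT B =====
-- sum(max(w, 1) for u, w in values if u == v)
def pvTotal (values : List (String × Int)) (v : String) : Int :=
  values.foldl (fun a p => if p.1 == v then a + max p.2 1 else a) 0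

-- list(dict.fromkeys(…)) is PySem.List.dedup; max(order, key=…, default="") is PySem.List.maxD
def weighted_mode_alt (values : List (String × Int)) : String :=
  PySem.List.maxD (PySem.List.dedup (values.map Prod.fst)) (fun v => pvTotal values v) ""

-- ===== PRECONDITION & SPEC =====
def Spec_weighted_mode (values : List (String × Int)) (out : String) : Prop := out = weighted_mode_alt values
instance (values : List (String × Int)) (out : String) : Decidable (Spec_weighted_mode values out) := by unfold Spec_weighted_mode; infer_instance

-- ===== CLAIM (what is proved, stated in full; the proofs are below) =====
def Claim_equal_weighted_mode : Prop := ∀ (values : List (String × Int)), Dom_weighted_mode values → Spec_weighted_mode values (weighted_mode values)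

-- ===== LEMMAS AND PROOFS =====

-- appending one pair to the input adds max(weight,1) to that key's total and nothing else
theorem pvTotal_append (vs : List (String × Int)) (q : String × Int) (v : String) :
    pvTotal (vs ++ [q]) v
      = if q.1 == v then pvTotal vs v + max q.2 1 else pvTotal vs v := by
  simp [pvTotal, List.foldl_append]

-- a key that never occurs has total 0
theorem pvTotal_eq_zero (vs : List (String × Int)) (v : String)
    (h : ∀ p ∈ vs, p.1 ≠ v) : pvTotal vs v = 0 := by
  induction vs with
  | nil => rfl
  | cons p t ih =>
    have hp : (p.1 == v) = false := beq_eq_false_iff_ne.mpr (h p (by simp))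
    simp only [pvTotal, List.foldl_cons, hp, Bool.false_eq_true, if_false]
    exact ih (fun r hr => h r (by simp [hr]))

-- the total-weight fold never decreases below its seed
theorem pvTotal_fold_ge (vs : List (String × Int)) (v : String) (a : Int) :
    a ≤ vs.foldl (fun a p => if p.1 == v then a + max p.2 1 else a) a := by
  induction vs generalizing a with
  | nil => exact le_refl a
  | cons p t ih =>
    simp only [List.foldl_cons]
    split
    · exact le_trans (by have := le_max_right p.2 1; omega) (ih (a + max p.2 1))
    · exact ih a

-- a key that occurs has total ≥ 1 (the max(weight, 1) floor)
theorem pvTotal_pos (vs : List (String × Int)) (v : String)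
    (h : ∃ p ∈ vs, p.1 = v) : 1 ≤ pvTotal vs v := by
  induction vs with
  | nil => simp at h
  | cons p t ih =>
    by_cases hp : p.1 = v
    · have hb : (p.1 == v) = true := beq_iff_eq.mpr hp
      simp only [pvTotal, List.foldl_cons, hb, if_true, zero_add]
      exact le_trans (by have := le_max_right p.2 1; omega) (pvTotal_fold_ge t v (max p.2 1))
    · have hb : (p.1 == v) = false := beq_eq_false_iff_ne.mpr hp
      simp only [pvTotal, List.foldl_cons, hb, Bool.false_eq_true, if_false]
      rcases h with ⟨r, hr, hrv⟩
      rcases List.mem_cons.mp hr with h1 | h1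
      · exact absurd (h1 ▸ hrv) hp
      · exact ih ⟨r, h1, hrv⟩

-- the dict built by A's first loop, characterised: its items are the keys in
-- first-occurrence order, each paired with its accumulated total
theorem pvBuild_items (values : List (String × Int)) :
    (pvBuild values).items
      = (PySem.List.dedup (values.map Prod.fst)).map (fun v => (v, pvTotal values v)) := by
  induction values using List.reverseRecOn with
  | nil => rfl
  | append_singleton vs q ih =>
    have hbuild : pvBuild (vs ++ [q])
        = (pvBuild vs).insert q.1 ((pvBuild vs).getD q.1 0 + max q.2 1) := by
      simp [pvBuild, List.foldl_append]
    have hdedup : PySem.List.dedup ((vs ++ [q]).map Prod.fst)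
        = PySem.Set.add (PySem.List.dedup (vs.map Prod.fst)) q.1 := by
      simp [PySem.List.dedup, PySem.Set.ofList, List.foldl_append]
    set F := PySem.List.dedup (vs.map Prod.fst) with hF
    by_cases hmem : q.1 ∈ F
    · -- the key is already present: insert overwrites in place, dedup is unchanged
      have hcont : (pvBuild vs).contains q.1 = true := by
        simp only [PySem.Dict.contains, ih, List.any_map, List.any_eq_true]
        exact ⟨q.1, hmem, by simp⟩
      have hfind : F.find? (fun v => v == q.1) = some q.1 := by
        cases hf : F.find? (fun v => v == q.1) with
        | none =>
          have := List.find?_eq_none.mp hf q.1 hmem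
          simp at this
        | some x =>
          have hx : x = q.1 := by simpa using List.find?_some hf
          rw [hx]
      have hget : (pvBuild vs).getD q.1 0 = pvTotal vs q.1 := by
        simp only [PySem.Dict.getD, PySem.Dict.get?, ih, List.find?_map]
        have hc : ((fun p => p.1 == q.1) ∘ fun v => (v, pvTotal vs v)) = fun v => v == q.1 := rfl
        rw [hc, hfind]
        rfl
      have hadd : PySem.Set.add F q.1 = F := by
        simp [PySem.Set.add, PySem.Set.contains, List.contains_eq_mem, hmem]
      rw [hbuild, hdedup, hadd]
      simp only [PySem.Dict.insert, hcont, if_true, ih, List.map_map]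
      apply List.map_congr_left
      intro v hvF
      by_cases hv : v = q.1
      · subst hv
        simp only [Function.comp, beq_self_eq_true, if_true, hget, pvTotal_append]
      · have hb1 : (v == q.1) = false := beq_eq_false_iff_ne.mpr hv
        have hb2 : (q.1 == v) = false := beq_eq_false_iff_ne.mpr (Ne.symm hv)
        simp only [Function.comp, hb1, Bool.false_eq_true, if_false, pvTotal_append, hb2]
    · -- new key: insert appends, dedup appends
      have hcont : (pvBuild vs).contains q.1 = false := by
        simp only [PySem.Dict.contains, ih, List.any_map]
        rw [List.any_eq_false]
        intro v hvF
        simp only [Function.comp]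
        have hne : v ≠ q.1 := fun h => hmem (h ▸ hvF)
        exact fun hb => hne (by simpa using hb)
      have hnotvs : ∀ p ∈ vs, p.1 ≠ q.1 := by
        intro p hp hpq
        exact hmem (hF ▸ (PySem.List.mem_dedup _ _).mpr (List.mem_map.mpr ⟨p, hp, hpq⟩))
      have hget : (pvBuild vs).getD q.1 0 = 0 := by
        simp only [PySem.Dict.getD, PySem.Dict.get?, ih, List.find?_map]
        have hc : ((fun p => p.1 == q.1) ∘ fun v => (v, pvTotal vs v)) = fun v => v == q.1 := rfl
        rw [hc]
        have : F.find? (fun v => v == q.1) = none := by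
          rw [List.find?_eq_none]
          intro v hvF
          have hne : v ≠ q.1 := fun h => hmem (h ▸ hvF)
          exact fun hb => hne (by simpa using hb)
        rw [this]
        rfl
      have hadd : PySem.Set.add F q.1 = F ++ [q.1] := by
        simp [PySem.Set.add, PySem.Set.contains, List.contains_eq_mem, hmem]
      rw [hbuild, hdedup, hadd]
      simp only [PySem.Dict.insert, hcont, Bool.false_eq_true, if_false, ih, List.map_append,
        List.map_cons, List.map_nil]
      congr 1
      · apply List.map_congr_left
        intro v hvF
        have hb : (q.1 == v) = false :=
          beq_eq_false_iff_ne.mpr (by intro h; rw [← h] at hvF; exact hmem hvF)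
        simp only [pvTotal_append, hb, Bool.false_eq_true, if_false]
      · simp only [pvTotal_append, beq_self_eq_true, if_true,
          pvTotal_eq_zero vs q.1 hnotvs, hget, zero_add]

-- A's scan over mapped items agrees with the keyed running maximum
theorem pv_scan_corr (K : String → Int) (t : List String) (m : String) :
    (t.map (fun v => (v, K v))).foldl pvStep (m, K m)
      = (t.foldl (fun b v => if K b < K v then v else b) m,
         K (t.foldl (fun b v => if K b < K v then v else b) m)) := by
  induction t generalizing m with
  | nil => rfl
  | cons v t ih =>
    simp only [List.map_cons, List.foldl_cons, pvStep]
    by_cases h : K m < K v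
    · simp only [gt_iff_lt, h, if_true]
      exact ih v
    · simp only [gt_iff_lt, h, if_false]
      exact ih m

-- Python max over a nonempty list is the plain keyed running maximum (first extremal)
theorem pv_max?_cons (K : String → Int) (t : List String) (m : String) :
    PySem.List.max? (m :: t) K
      = some (t.foldl (fun b v => if K b < K v then v else b) m) := by
  induction t generalizing m with
  | nil => rfl
  | cons v t ih =>
    have h1 : PySem.List.max? (m :: v :: t) K
        = PySem.List.max? ((if K m < K v then v else m) :: t) K := by
      simp only [PySem.List.max?, List.foldl_cons]
      split <;> rfl
    rw [h1, ih, List.foldl_cons]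

theorem weighted_mode_eq_alt (values : List (String × Int)) :
    weighted_mode values = weighted_mode_alt values := by
  cases hv : values with
  | nil => rfl
  | cons p vs =>
    rw [← hv]
    unfold weighted_mode weighted_mode_alt
    rw [pvBuild_items]
    set K : String → Int := fun v => pvTotal values v with hK
    set F := PySem.List.dedup (values.map Prod.fst) with hF
    have hpF : p.1 ∈ F := by
      rw [hF]
      exact (PySem.List.mem_dedup _ _).mpr (by rw [hv]; simp)
    cases hFe : F with
    | nil => rw [hFe] at hpF; cases hpF
    | cons f0 ft =>
      have hKf0 : 1 ≤ K f0 := by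
        have : f0 ∈ F := by rw [hFe]; simp
        have hmem : f0 ∈ values.map Prod.fst := (PySem.List.mem_dedup _ _).mp (hF ▸ this)
        obtain ⟨r, hr, hrf⟩ := List.mem_map.mp hmem
        exact pvTotal_pos values f0 ⟨r, hr, hrf⟩
      simp only [List.map_cons, List.foldl_cons]
      have hfirst : pvStep ("", -1) (f0, K f0) = (f0, K f0) := by
        simp only [pvStep]
        have : (-1 : Int) < K f0 := by omega
        simp [this]
      rw [hfirst, pv_scan_corr K ft f0]
      simp only [PySem.List.maxD]
      rw [pv_max?_cons K ft f0]
      rfl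

-- ===== VERDICT (by name: the statement is the Claim_ definition above) =====
theorem weighted_mode_spec : Claim_equal_weighted_mode := by
  intro values _
  unfold Spec_weighted_mode
  exact weighted_mode_eq_alt values
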